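-- pv_equiv track=rewrite | github.com/viren1698/digitalAlpha | Demos/POC-Final-Demo/benefits_actions.py | get_key_section
-- ===== SOURCE A (Python) =====
-- def get_key_section(user_input_words,d_stem):
--     key_section={}
--     for i in user_input_words:
--         temp=[]
--         for key,val in d_stem.items():
--              if i in val:
--                  temp.append(key)
--         key_section[i]=set(temp)
--     return key_section
-- ===== SOURCE B (Python) =====
-- def get_key_section(user_input_words, d_stem):
--     # Inverted index: element -> list of keys containing it (built once),
--     # then each word is a single dictionary lookup.
--     index = {}
--     for key, val in d_stem.items():
--         for elem in dict.fromkeys(val):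
--             index.setdefault(elem, []).append(key)
--     return {w: set(index.get(w, [])) for w in user_input_words}
-- ===== Notes on version B (the rewrite author's own statement) =====
-- stated objective: faster
-- what changed: B builds an inverted index (element -> list of keys) over d_stem once and answers each word with a single dictionary lookup, instead of A's rescan of every (key, value) pair for every word.
import Mathlib
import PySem

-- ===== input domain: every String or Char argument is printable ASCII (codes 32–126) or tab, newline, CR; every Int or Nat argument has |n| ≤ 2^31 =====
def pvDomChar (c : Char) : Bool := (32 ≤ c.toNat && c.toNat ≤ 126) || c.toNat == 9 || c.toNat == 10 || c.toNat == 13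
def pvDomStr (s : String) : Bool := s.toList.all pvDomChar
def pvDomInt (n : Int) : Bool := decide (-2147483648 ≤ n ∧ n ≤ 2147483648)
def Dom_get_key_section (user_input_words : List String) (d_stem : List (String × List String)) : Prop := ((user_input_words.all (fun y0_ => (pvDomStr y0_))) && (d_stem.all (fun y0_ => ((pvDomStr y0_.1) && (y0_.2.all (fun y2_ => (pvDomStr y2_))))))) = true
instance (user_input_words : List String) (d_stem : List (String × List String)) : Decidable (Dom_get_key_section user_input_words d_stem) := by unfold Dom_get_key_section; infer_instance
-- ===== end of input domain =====

-- B replaces A's per-word scan of every dict value with an inverted index (element -> keys)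
-- built once, one lookup per word (objective: faster, asymptotic).

-- ===== PORT A =====
-- for each word: scan all (key, val) pairs, collect keys with word ∈ val, store the set
def get_key_section (user_input_words : List String) (d_stem : List (String × List String)) : List (String × List String) :=
  let d := PySem.Dict.ofList d_stem
  (user_input_words.foldl
    (fun (key_section : PySem.Dict String (PySem.Set String)) i =>
      let temp := d.items.foldl
        (fun (temp : List String) kv => if i ∈ kv.2 then temp ++ [kv.1] else temp) []
      key_section.insert i (PySem.Set.ofList temp))
    PySem.Dict.empty).items

-- ===== PORT B =====
-- inverted index element -> keys, then one getD per word
def get_key_section_alt (user_input_words : List String) (d_stem : List (String × List String)) : List (String × List String) :=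
  let d := PySem.Dict.ofList d_stem
  let index := d.items.foldl
    (fun (index : PySem.Dict String (List String)) kv =>
      (PySem.List.dedup kv.2).foldl
        (fun (index : PySem.Dict String (List String)) elem =>
          index.modify elem [] (fun l => l ++ [kv.1])) index)
    PySem.Dict.empty
  (user_input_words.foldl
    (fun (out : PySem.Dict String (PySem.Set String)) w =>
      out.insert w (PySem.Set.ofList (index.getD w [])))
    PySem.Dict.empty).items

-- ===== PRECONDITION & SPEC =====
def Spec_get_key_section (user_input_words : List String) (d_stem : List (String × List String)) (out : List (String × List String)) : Prop := out = get_key_section_alt user_input_words d_stem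
instance (user_input_words : List String) (d_stem : List (String × List String)) (out : List (String × List String)) : Decidable (Spec_get_key_section user_input_words d_stem out) := by unfold Spec_get_key_section; infer_instance

-- ===== CLAIM (what is proved, stated in full; the proofs are below) =====
def Claim_equal_get_key_section : Prop := ∀ (user_input_words : List String) (d_stem : List (String × List String)), Dom_get_key_section user_input_words d_stem → Spec_get_key_section user_input_words d_stem (get_key_section user_input_words d_stem)

-- ===== LEMMAS AND PROOFS =====

-- A's filtered key scan, as a flatMap over the items
theorem pv_tempA_eq (items : List (String × List String)) (w : String) :
    items.foldl (fun (temp : List String) kv => if w ∈ kv.2 then temp ++ [kv.1] else temp) []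
      = items.flatMap (fun kv => if w ∈ kv.2 then [kv.1] else []) := by
  induction items using List.reverseRecOn with
  | nil => rfl
  | append_singleton xs x ih =>
      simp [List.foldl_append, List.flatMap_append, ih]
      split_ifs <;> simp

-- B's inverted-index lookup at w, as the same flatMap
theorem pv_index_getD (items : List (String × List String)) (w : String) :
    ((items.foldl
        (fun (index : PySem.Dict String (List String)) kv =>
          (PySem.List.dedup kv.2).foldl
            (fun (index : PySem.Dict String (List String)) elem =>
              index.modify elem [] (fun l => l ++ [kv.1])) index)
        PySem.Dict.empty).getD w [])
      = items.flatMap (fun kv => if w ∈ kv.2 then [kv.1] else []) := by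
  have hstep : ∀ (idx : PySem.Dict String (List String)) (kv : String × List String),
      kv ∈ items →
      (PySem.List.dedup kv.2).foldl
          (fun (index : PySem.Dict String (List String)) elem =>
            index.modify elem [] (fun l => l ++ [kv.1])) idx
        = ((PySem.List.dedup kv.2).map (fun e => (e, kv.1))).foldl
            (fun (d : PySem.Dict String (List String)) p =>
              d.modify p.1 [] (fun l => l ++ [p.2])) idx := by
    intro idx kv _; rw [List.foldl_map]
  rw [PySem.List.foldl_congr_mem _ _ _ _ hstep, ← List.foldl_flatMap,
    PySem.Dict.getD_foldl_modify_append, PySem.Dict.getD_empty,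
    List.filter_flatMap, List.map_flatMap]
  simp only [List.nil_append]
  congr 1
  funext kv
  rw [List.filter_map, List.map_map]
  have : ((fun p => p.1 == w) ∘ fun e => (e, kv.1)) = fun e => e == w := rfl
  rw [this, List.filter_beq w, List.map_replicate,
    List.Nodup.count (PySem.List.nodup_dedup kv.2)]
  by_cases h : w ∈ kv.2 <;> simp [h]

-- ===== VERDICT (by name: the statement is the Claim_ definition above) =====
theorem get_key_section_spec : Claim_equal_get_key_section := by
  intro uiw d _
  unfold Spec_get_key_section get_key_section get_key_section_alt
  simp only []
  congr 1
  apply PySem.List.foldl_congr_mem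
  intro acc w _
  rw [pv_tempA_eq, pv_index_getD]
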